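-- pv_equiv track=rewrite | github.com/bharathi0811/Closest_min_max | closest_min_max.py | close_min_max
-- ===== SOURCE A (Python) =====
-- def close_min_max(array):
--     n = len(array)
--     if n<=2:
--         return n
--     else:
--         min_ = array[0]
--         max_=array[0]
--         for i in array:
--             if i>max_:
--                 max_=i
--             if i <min_:
--                 min_=i
--         j_index=0
--         max_index=array.index(max_)
--         index_=0
--         l=[]
--         for j in array:
--             index_ += 1
--             if j ==min_:
--                 l.append(index_)
--         lst=0
--         for m in range(l[-1],max_index+2):
--             lst+=1
--         return lst
-- ===== SOURCE B (Python) =====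
-- def close_min_max(array):
--     n = len(array)
--     if n <= 2:
--         return n
--     mn = mx = array[0]
--     last_min = first_max = 0
--     for i, v in enumerate(array):
--         if v < mn:
--             mn = v
--             last_min = i
--         elif v == mn:
--             last_min = i
--         if v > mx:
--             mx = v
--             first_max = i
--     return max(0, first_max - last_min + 1)
-- ===== Notes on version B (the rewrite author's own statement) =====
-- stated objective: simpler
-- what changed: Replaces A's min/max pass, .index call, 1-based min-index list and range-counting loop with a single fused scan tracking (min, last min index, max, first max index) and the closed form max(0, first_max - last_min + 1).
import Mathlib
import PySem

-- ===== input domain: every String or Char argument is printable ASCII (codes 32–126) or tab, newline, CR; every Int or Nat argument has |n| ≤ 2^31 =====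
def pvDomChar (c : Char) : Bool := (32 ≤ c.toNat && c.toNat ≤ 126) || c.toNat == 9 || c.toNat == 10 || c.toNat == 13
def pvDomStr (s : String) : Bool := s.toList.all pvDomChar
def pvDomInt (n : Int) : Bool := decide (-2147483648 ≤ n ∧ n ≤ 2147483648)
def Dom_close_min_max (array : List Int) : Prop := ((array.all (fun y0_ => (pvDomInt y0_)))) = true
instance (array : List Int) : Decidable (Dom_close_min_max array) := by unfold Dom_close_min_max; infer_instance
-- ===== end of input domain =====

-- B replaces A's four passes (min/max loop, .index, 1-based min-index list, range-count)
-- by one fused scan and a closed form; objective: simpler.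

-- ===== PORT A =====
def close_min_max (array : List Int) : Int :=
  let n : Int := array.length
  if n ≤ 2 then n
  else
    -- array[0]: n > 2 guarantees array ≠ [], so headI is exact here
    let a0 := array.headI
    let mm := array.foldl (fun (s : Int × Int) i =>
      let mx := if i > s.2 then i else s.2
      let mn := if i < s.1 then i else s.1
      (mn, mx)) (a0, a0)
    -- array.index(max_): max_ is an element of array, so index? always finds it (getD exact)
    let maxIndex : Int := ((PySem.List.index? array mm.2).getD 0 : Nat)
    let il := array.foldl (fun (s : Int × List Int) j =>
      let idx := s.1 + 1
      (idx, if j = mm.1 then s.2 ++ [idx] else s.2)) (0, [])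
    -- l[-1]: l is nonempty since min_ occurs in array (pyGetD exact)
    let lLast := PySem.List.pyGetD il.2 (-1) 0
    (PySem.List.pyRange lLast (maxIndex + 2) 1).foldl (fun lst _ => lst + 1) 0

-- ===== PORT B =====
def close_min_max_alt (array : List Int) : Int :=
  let n : Int := array.length
  if n ≤ 2 then n
  else
    let a0 := array.headI
    let st := (PySem.List.enumerate array 0).foldl
      (fun (s : Int × Int × Int × Int) (p : Int × Int) =>
        let mnlm := if p.2 < s.1 then (p.2, p.1)
                    else if p.2 = s.1 then (s.1, p.1)
                    else (s.1, s.2.1)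
        let mxfm := if p.2 > s.2.2.1 then (p.2, p.1) else (s.2.2.1, s.2.2.2)
        (mnlm.1, mnlm.2, mxfm.1, mxfm.2)) (a0, 0, a0, 0)
    max 0 (st.2.2.2 - st.2.1 + 1)

-- ===== PRECONDITION & SPEC =====
def Spec_close_min_max (array : List Int) (out : Int) : Prop := out = close_min_max_alt array
instance (array : List Int) (out : Int) : Decidable (Spec_close_min_max array out) := by unfold Spec_close_min_max; infer_instance

-- ===== CLAIM (what is proved, stated in full; the proofs are below) =====
def Claim_equal_close_min_max : Prop := ∀ (array : List Int), Dom_close_min_max array → Spec_close_min_max array (close_min_max array)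

-- ===== LEMMAS AND PROOFS =====

-- running minimum / maximum (the folds both programs compute)
def fmin (m : Int) : List Int → Int
  | [] => m
  | y :: ys => fmin (if y < m then y else m) ys

def fmax (m : Int) : List Int → Int
  | [] => m
  | y :: ys => fmax (if y > m then y else m) ys

-- last 0-based index of v in ys (meaningful when v ∈ ys)
def lastIdxOf (v : Int) : List Int → Int
  | [] => 0
  | _ :: ys => if v ∈ ys then 1 + lastIdxOf v ys else 0

-- first 0-based index of v in ys (meaningful when v ∈ ys)
def firstIdxOf (v : Int) : List Int → Int
  | [] => 0
  | y :: ys => if y = v then 0 else 1 + firstIdxOf v ys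

-- index trackers of B's scan, unbundled
def lmS : List Int → Int → Int → Int → Int
  | [], _, _, lm => lm
  | y :: ys, k, mn, lm => lmS ys (k+1) (if y < mn then y else mn) (if y ≤ mn then k else lm)

def fmS : List Int → Int → Int → Int → Int
  | [], _, _, fm => fm
  | y :: ys, k, mx, fm => fmS ys (k+1) (if y > mx then y else mx) (if y > mx then k else fm)

theorem foldA_pair (ys : List Int) : ∀ mn mx : Int,
    ys.foldl (fun (s : Int × Int) i =>
      let mx := if i > s.2 then i else s.2
      let mn := if i < s.1 then i else s.1
      (mn, mx)) (mn, mx) = (fmin mn ys, fmax mx ys) := by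
  induction ys with
  | nil => intro mn mx; rfl
  | cons y ys ih => intro mn mx; simpa [fmin, fmax] using ih _ _

theorem le_fmax_init (ys : List Int) : ∀ m : Int, m ≤ fmax m ys := by
  induction ys with
  | nil => intro m; simp [fmax]
  | cons y ys ih => intro m; simp only [fmax]; exact le_trans (by split <;> omega) (ih _)

theorem le_fmax_of_mem {z : Int} {ys : List Int} (h : z ∈ ys) : ∀ m, z ≤ fmax m ys := by
  induction ys with
  | nil => cases h
  | cons y ys ih =>
    intro m
    simp only [fmax]
    rcases List.mem_cons.1 h with rfl | hz
    · exact le_trans (by split <;> omega) (le_fmax_init ys _)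
    · exact ih hz _

theorem fmin_eq_of_all_gt {ys : List Int} : ∀ m, (∀ z ∈ ys, m < z) → fmin m ys = m := by
  induction ys with
  | nil => intro m _; rfl
  | cons y ys ih =>
    intro m h
    have hy := h y (by simp)
    simp only [fmin, if_neg (by omega : ¬ y < m)]
    exact ih m (fun z hz => h z (by simp [hz]))

theorem fmax_eq_of_all_le {ys : List Int} : ∀ m, (∀ z ∈ ys, z ≤ m) → fmax m ys = m := by
  induction ys with
  | nil => intro m _; rfl
  | cons y ys ih =>
    intro m h
    have hy := h y (by simp)
    simp only [fmax, if_neg (by omega : ¬ y > m)]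
    exact ih m (fun z hz => h z (by simp [hz]))

theorem fmin_mem_of_exists_le {ys : List Int} : ∀ m, (∃ z ∈ ys, z ≤ m) → fmin m ys ∈ ys := by
  induction ys with
  | nil => rintro m ⟨z, hz, _⟩; cases hz
  | cons y ys ih =>
    intro m h
    simp only [fmin]
    by_cases hex : ∃ z ∈ ys, z ≤ (if y < m then y else m)
    · exact List.mem_cons_of_mem _ (ih _ hex)
    · push_neg at hex
      rw [fmin_eq_of_all_gt _ hex]
      rcases h with ⟨z, hz, hzm⟩
      rcases List.mem_cons.1 hz with heq | hzys
      · have hym : y ≤ m := heq ▸ hzm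
        by_cases hy : y < m
        · rw [if_pos hy]; exact List.mem_cons_self
        · rw [if_neg hy]
          have : m = y := by omega
          rw [this]; exact List.mem_cons_self
      · by_cases hy : y < m
        · rw [if_pos hy]; exact List.mem_cons_self
        · exfalso; have := hex z hzys; rw [if_neg hy] at this; omega

theorem fmax_mem_or_init {ys : List Int} : ∀ m : Int, fmax m ys = m ∨ fmax m ys ∈ ys := by
  induction ys with
  | nil => intro m; left; rfl
  | cons y ys ih =>
    intro m
    simp only [fmax]
    by_cases hy : y > m
    · rw [if_pos hy]
      rcases ih y with h | h
      · right; rw [h]; exact List.mem_cons_self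
      · right; exact List.mem_cons_of_mem _ h
    · rw [if_neg hy]
      rcases ih m with h | h
      · left; exact h
      · right; exact List.mem_cons_of_mem _ h

theorem fmin_mem_or_init {ys : List Int} : ∀ m : Int, fmin m ys = m ∨ fmin m ys ∈ ys := by
  induction ys with
  | nil => intro m; left; rfl
  | cons y ys ih =>
    intro m
    simp only [fmin]
    by_cases hy : y < m
    · rw [if_pos hy]
      rcases ih y with h | h
      · right; rw [h]; exact List.mem_cons_self
      · right; exact List.mem_cons_of_mem _ h
    · rw [if_neg hy]
      rcases ih m with h | h
      · left; exact h
      · right; exact List.mem_cons_of_mem _ h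

-- characterization of the index? call A makes
theorem index?_getD_eq_firstIdxOf {v : Int} {xs : List Int} (h : v ∈ xs) :
    ((PySem.List.index? xs v).getD 0 : Int) = firstIdxOf v xs := by
  induction xs with
  | nil => cases h
  | cons x xs ih =>
    by_cases hx : x = v
    · subst hx; rw [PySem.List.index?_cons_self]; simp [firstIdxOf]
    · have hv : v ∈ xs := by
        rcases List.mem_cons.1 h with heq | h2
        · exact absurd heq.symm hx
        · exact h2
      rw [PySem.List.index?_cons_of_ne xs hx]
      cases hk : PySem.List.index? xs v with
      | none => exact absurd hv ((PySem.List.index?_eq_none_iff xs v).1 hk)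
      | some k =>
        have := ih hv
        rw [hk] at this
        simp only [Option.map_some, Option.getD_some] at this ⊢
        simp only [firstIdxOf, if_neg hx]
        push_cast at this ⊢
        omega

-- characterization of A's min-index-list pass
theorem lfold_not_mem {v : Int} {ys : List Int} (h : v ∉ ys) : ∀ (c : Int) (acc : List Int),
    (ys.foldl (fun (s : Int × List Int) j =>
      let idx := s.1 + 1
      (idx, if j = v then s.2 ++ [idx] else s.2)) (c, acc)).2 = acc := by
  induction ys with
  | nil => intro c acc; rfl
  | cons y ys ih =>
    intro c acc
    have hy : y ≠ v := fun e => h (by simp [e])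
    have hv : v ∉ ys := fun e => h (by simp [e])
    simp only [List.foldl_cons, if_neg hy]
    exact ih hv _ _

theorem lfold_mem {v : Int} {ys : List Int} (h : v ∈ ys) : ∀ (c : Int) (acc : List Int),
    PySem.List.pyGetD (ys.foldl (fun (s : Int × List Int) j =>
      let idx := s.1 + 1
      (idx, if j = v then s.2 ++ [idx] else s.2)) (c, acc)).2 (-1) 0
      = c + lastIdxOf v ys + 1 := by
  induction ys with
  | nil => cases h
  | cons y ys ih =>
    intro c acc
    simp only [List.foldl_cons]
    by_cases hv : v ∈ ys
    · have := ih hv (c + 1) (if y = v then acc ++ [c + 1] else acc)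
      simp only [lastIdxOf, if_pos hv]
      rw [this]; omega
    · have hyv : y = v := by
        rcases List.mem_cons.1 h with heq | h2
        · exact heq.symm
        · exact absurd h2 hv
      rw [if_pos hyv]
      rw [lfold_not_mem hv]
      simp [lastIdxOf, if_neg hv, PySem.List.pyGetD_neg_one_append_singleton]

-- the counting loop over range(a, b) computes max 0 (b - a)
theorem foldl_count (l : List Int) : ∀ c : Int,
    l.foldl (fun lst (_ : Int) => lst + 1) c = c + l.length := by
  induction l with
  | nil => intro c; simp
  | cons x xs ih => intro c; simp [List.foldl_cons, ih]; omega

-- B's fused scan, unbundled into the four spec functions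
theorem bfold (ys : List Int) : ∀ (k mn lm mx fm : Int),
    ((PySem.List.enumerate ys k).foldl
      (fun (s : Int × Int × Int × Int) (p : Int × Int) =>
        let mnlm := if p.2 < s.1 then (p.2, p.1)
                    else if p.2 = s.1 then (s.1, p.1)
                    else (s.1, s.2.1)
        let mxfm := if p.2 > s.2.2.1 then (p.2, p.1) else (s.2.2.1, s.2.2.2)
        (mnlm.1, mnlm.2, mxfm.1, mxfm.2)) (mn, lm, mx, fm))
      = (fmin mn ys, lmS ys k mn lm, fmax mx ys, fmS ys k mx fm) := by
  induction ys with
  | nil => intro k mn lm mx fm; rfl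
  | cons y ys ih =>
    intro k mn lm mx fm
    rw [PySem.List.enumerate_cons]
    simp only [List.foldl_cons]
    rw [ih]
    simp only [fmin, fmax, lmS, fmS]
    have e1 : (if y < mn then (y, k) else if y = mn then (mn, k) else (mn, lm)).1
        = (if y < mn then y else mn) := by split_ifs <;> rfl
    have e2 : (if y < mn then (y, k) else if y = mn then (mn, k) else (mn, lm)).2
        = (if y ≤ mn then k else lm) := by split_ifs <;> simp_all <;> omega
    have e3 : (if y > mx then (y, k) else (mx, fm)).1 = (if y > mx then y else mx) := by
      split_ifs <;> rfl
    have e4 : (if y > mx then (y, k) else (mx, fm)).2 = (if y > mx then k else fm) := by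
      split_ifs <;> rfl
    rw [e1, e2, e3, e4]

theorem lmS_none {ys : List Int} : ∀ (k mn lm : Int), (∀ z ∈ ys, mn < z) →
    lmS ys k mn lm = lm := by
  induction ys with
  | nil => intro _ _ _ _; rfl
  | cons y ys ih =>
    intro k mn lm h
    have hy := h y (by simp)
    simp only [lmS, if_neg (by omega : ¬ y < mn), if_neg (by omega : ¬ y ≤ mn)]
    exact ih _ _ _ (fun z hz => h z (by simp [hz]))

theorem fmS_none {ys : List Int} : ∀ (k mx fm : Int), (∀ z ∈ ys, z ≤ mx) →
    fmS ys k mx fm = fm := by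
  induction ys with
  | nil => intro _ _ _ _; rfl
  | cons y ys ih =>
    intro k mx fm h
    have hy := h y (by simp)
    simp only [fmS, if_neg (by omega : ¬ y > mx)]
    exact ih _ _ _ (fun z hz => h z (by simp [hz]))

theorem lmS_char {ys : List Int} : ∀ (k mn lm : Int), (∃ z ∈ ys, z ≤ mn) →
    lmS ys k mn lm = k + lastIdxOf (fmin mn ys) ys := by
  induction ys with
  | nil => rintro _ _ _ ⟨z, hz, _⟩; cases hz
  | cons y ys ih =>
    intro k mn lm h
    simp only [lmS, fmin]
    by_cases hex : ∃ z ∈ ys, z ≤ (if y < mn then y else mn)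
    · rw [ih _ _ _ hex]
      have hmem : fmin (if y < mn then y else mn) ys ∈ ys := fmin_mem_of_exists_le _ hex
      simp only [lastIdxOf, if_pos hmem]
      omega
    · push_neg at hex
      have hfix : fmin (if y < mn then y else mn) ys = (if y < mn then y else mn) :=
        fmin_eq_of_all_gt _ hex
      have hyle : y ≤ mn := by
        by_contra hgt
        rcases h with ⟨z, hz, hzm⟩
        rcases List.mem_cons.1 hz with rfl | hzys
        · omega
        · have := hex z hzys; split at this <;> omega
      have hnm : fmin (if y < mn then y else mn) ys ∉ ys := by
        rw [hfix]; intro hm; have := hex _ hm; split at this <;> omega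
      rw [lmS_none _ _ _ hex, if_pos hyle]
      simp only [lastIdxOf, if_neg hnm]
      omega

theorem fmS_char {ys : List Int} : ∀ (k mx fm : Int), (∃ z ∈ ys, mx < z) →
    fmS ys k mx fm = k + firstIdxOf (fmax mx ys) ys := by
  induction ys with
  | nil => rintro _ _ _ ⟨z, hz, _⟩; cases hz
  | cons y ys ih =>
    intro k mx fm h
    simp only [fmS, fmax]
    by_cases hy : y > mx
    · rw [if_pos hy, if_pos hy]
      by_cases hex : ∃ z ∈ ys, y < z
      · rw [ih _ _ _ hex]
        have hne : y ≠ fmax y ys := by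
          rcases hex with ⟨z, hz, hzy⟩
          have := le_fmax_of_mem hz y; omega
        simp only [firstIdxOf, if_neg hne]; omega
      · push_neg at hex
        rw [fmS_none _ _ _ hex, fmax_eq_of_all_le _ hex]
        simp [firstIdxOf]
    · rw [if_neg hy, if_neg hy]
      have hex : ∃ z ∈ ys, mx < z := by
        rcases h with ⟨z, hz, hzm⟩
        rcases List.mem_cons.1 hz with rfl | hzys
        · omega
        · exact ⟨z, hzys, hzm⟩
      rw [ih _ _ _ hex]
      have hne : y ≠ fmax mx ys := by
        rcases hex with ⟨z, hz, hzm⟩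
        have := le_fmax_of_mem hz mx; omega
      simp only [firstIdxOf, if_neg hne]; omega

-- value of A's else-branch in terms of the spec functions
theorem A_val (x : Int) (xs : List Int) (h : ¬ ((x :: xs).length : Int) ≤ 2) :
    close_min_max (x :: xs)
      = max 0 (firstIdxOf (fmax x (x :: xs)) (x :: xs)
               - lastIdxOf (fmin x (x :: xs)) (x :: xs) + 1) := by
  have hmnmem : fmin x (x :: xs) ∈ x :: xs := by
    rcases fmin_mem_or_init (ys := x :: xs) x with hm | hm
    · rw [hm]; exact List.mem_cons_self
    · exact hm
  have hmxmem : fmax x (x :: xs) ∈ x :: xs := by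
    rcases fmax_mem_or_init (ys := x :: xs) x with hm | hm
    · rw [hm]; exact List.mem_cons_self
    · exact hm
  simp only [close_min_max, if_neg h, List.headI, foldA_pair]
  rw [lfold_mem hmnmem, index?_getD_eq_firstIdxOf hmxmem, foldl_count,
    PySem.List.length_pyRange_one]
  omega

-- value of B's else-branch in terms of the same spec functions
theorem B_val (x : Int) (xs : List Int) (h : ¬ ((x :: xs).length : Int) ≤ 2) :
    close_min_max_alt (x :: xs)
      = max 0 (firstIdxOf (fmax x (x :: xs)) (x :: xs)
               - lastIdxOf (fmin x (x :: xs)) (x :: xs) + 1) := by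
  simp only [close_min_max_alt, if_neg h, List.headI, bfold]
  have hlm : lmS (x :: xs) 0 x 0 = lastIdxOf (fmin x (x :: xs)) (x :: xs) := by
    rw [lmS_char 0 x 0 ⟨x, List.mem_cons_self, le_refl x⟩]; ring
  have hfm : fmS (x :: xs) 0 x 0 = firstIdxOf (fmax x (x :: xs)) (x :: xs) := by
    by_cases hex : ∃ z ∈ x :: xs, x < z
    · rw [fmS_char 0 x 0 hex]; ring
    · push_neg at hex
      have h1 : fmS (x :: xs) 0 x 0 = 0 := fmS_none 0 x 0 hex
      have h2 : fmax x (x :: xs) = x := by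
        simp only [fmax, if_neg (by omega : ¬ x > x)]
        exact fmax_eq_of_all_le x (fun z hz => hex z (List.mem_cons_of_mem _ hz))
      rw [h1, h2]; simp [firstIdxOf]
  rw [hlm, hfm]

-- ===== VERDICT (by name: the statement is the Claim_ definition above) =====
theorem close_min_max_spec : Claim_equal_close_min_max := by
  intro array _
  unfold Spec_close_min_max
  by_cases hn : (array.length : Int) ≤ 2
  · simp only [close_min_max, close_min_max_alt, if_pos hn]
  · cases array with
    | nil => simp at hn
    | cons x xs => rw [A_val x xs hn, B_val x xs hn]
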